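-- pv_equiv track=rewrite | github.com/WanManDu/Backjonn-Algorithm | 16564_2.py | level_management
-- ===== SOURCE A (Python) =====
-- def level_management(start, end, charLevel, k):
--
--     if start > end:
--         return end
--
--     lev = (start + end) // 2
--     levelup = 0
--
--     #현재의 레벨과 lev를 비교하였을 때, 현재의 레벨이 lev보다 작다면
--     #lev까지 lev - (현재레벨) 만큼 레벨을 올려야함
--     #올린 레벨은 levelup에 저장하고 levelup의 값을 기준으로 반복여부를 정함
--     for each_level in charLevel:
--         if each_level < lev:
--             levelup += lev - each_level
--
--     if levelup <= k:
--         return level_management(lev + 1, end, charLevel, k)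
--     else:
--         return level_management(start, lev - 1, charLevel, k)
-- ===== SOURCE B (Python) =====
-- def level_management(start, end, charLevel, k):
--     # One sort + prefix sums, then an iterative binary search over the level
--     # range; each cost query is answered in O(log n) via a count binary search.
--     s = sorted(charLevel)
--     pre = [0]
--     t = 0
--     for v in s:
--         t += v
--         pre.append(t)
--     lo, hi = start, end
--     while lo <= hi:
--         mid = (lo + hi) // 2
--         # a = number of elements of s strictly below mid (binary search)
--         a, b = 0, len(s)
--         while a < b:
--             m = (a + b) // 2
--             if s[m] < mid:
--                 a = m + 1
--             else:
--                 b = m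
--         if a * mid - pre[a] <= k:
--             lo = mid + 1
--         else:
--             hi = mid - 1
--     return hi
-- ===== Notes on version B (the rewrite author's own statement) =====
-- stated objective: alternative
-- what changed: B sorts charLevel once and builds prefix sums, then runs an iterative binary search over the level range answering each cost query by a binary count search plus prefix-sum arithmetic, instead of A's recursive search that rescans the whole list on every step; intended as faster (measured up to ~6x at large n, but not consistent across all generated inputs).
import Mathlib
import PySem

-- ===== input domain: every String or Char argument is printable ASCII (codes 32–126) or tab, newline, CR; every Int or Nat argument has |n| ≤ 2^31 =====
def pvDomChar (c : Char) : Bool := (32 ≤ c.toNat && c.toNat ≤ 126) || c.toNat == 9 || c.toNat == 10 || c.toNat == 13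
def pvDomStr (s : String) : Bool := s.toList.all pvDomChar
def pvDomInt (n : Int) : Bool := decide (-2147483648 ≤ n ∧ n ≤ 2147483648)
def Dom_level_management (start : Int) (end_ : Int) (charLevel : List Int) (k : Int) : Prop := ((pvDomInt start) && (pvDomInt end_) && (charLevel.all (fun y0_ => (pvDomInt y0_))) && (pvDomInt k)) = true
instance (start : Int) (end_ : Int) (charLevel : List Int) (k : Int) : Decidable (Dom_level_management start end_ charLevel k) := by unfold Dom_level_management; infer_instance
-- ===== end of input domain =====

-- B replaces A's per-step linear cost scan by one sort + prefix sums with a binary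
-- count search per query, and iterates the level search instead of recursing.

-- ===== PORT A =====
def level_management (start : Int) (end_ : Int) (charLevel : List Int) (k : Int) : Int :=
  if _h : start > end_ then end_
  else
    let lev := PySem.Int.floordiv (start + end_) 2
    let levelup := charLevel.foldl (fun acc e => if e < lev then acc + (lev - e) else acc) 0
    if levelup ≤ k then level_management (lev + 1) end_ charLevel k
    else level_management start (lev - 1) charLevel k
termination_by (end_ + 1 - start).toNat
decreasing_by
  · have := PySem.Int.floordiv_two_mid_bounds (show start ≤ end_ by omega)
    omega
  · have := PySem.Int.floordiv_two_mid_bounds (show start ≤ end_ by omega)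
    omega

-- ===== PORT B =====
-- helper: the prefix-sum list [0, s0, s0+s1, …]   (B's `pre` loop)
def pvPrefAux (t : Int) (s : List Int) : List Int :=
  match s with
  | [] => []
  | v :: r => (t + v) :: pvPrefAux (t + v) r

def pvPrefix (s : List Int) : List Int := 0 :: pvPrefAux 0 s

-- helper: B's inner `while a < b` binary count search (number of elements of s < x)
def pvCountLt (s : List Int) (x : Int) (a b : Nat) : Nat :=
  if _h : a < b then
    let m := (a + b) / 2
    if s.getD m 0 < x then pvCountLt s x (m + 1) b else pvCountLt s x a m
  else a
termination_by b - a
decreasing_by all_goals omega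

-- helper: B's outer `while lo <= hi` loop
def pvAltLoop (s pre : List Int) (k lo hi : Int) : Int :=
  if _h : lo ≤ hi then
    let mid := PySem.Int.floordiv (lo + hi) 2
    let a := pvCountLt s mid 0 s.length
    if (a : Int) * mid - pre.getD a 0 ≤ k then pvAltLoop s pre k (mid + 1) hi
    else pvAltLoop s pre k lo (mid - 1)
  else hi
termination_by (hi + 1 - lo).toNat
decreasing_by
  · have := PySem.Int.floordiv_two_mid_bounds (show lo ≤ hi from _h)
    omega
  · have := PySem.Int.floordiv_two_mid_bounds (show lo ≤ hi from _h)
    omega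

def level_management_alt (start : Int) (end_ : Int) (charLevel : List Int) (k : Int) : Int :=
  let s := PySem.List.sorted charLevel (fun x => x) false
  pvAltLoop s (pvPrefix s) k start end_

-- ===== PRECONDITION & SPEC =====
def Spec_level_management (start : Int) (end_ : Int) (charLevel : List Int) (k : Int) (out : Int) : Prop := out = level_management_alt start end_ charLevel k
instance (start : Int) (end_ : Int) (charLevel : List Int) (k : Int) (out : Int) : Decidable (Spec_level_management start end_ charLevel k out) := by unfold Spec_level_management; infer_instance

-- ===== CLAIM (what is proved, stated in full; the proofs are below) =====
def Claim_equal_level_management : Prop := ∀ (start : Int) (end_ : Int) (charLevel : List Int) (k : Int), Dom_level_management start end_ charLevel k → Spec_level_management start end_ charLevel k (level_management start end_ charLevel k)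

-- ===== LEMMAS AND PROOFS =====

-- A's loop is the sum of the per-element contributions
theorem pv_foldl_cost (lev : Int) (l : List Int) (c : Int) :
    l.foldl (fun acc e => if e < lev then acc + (lev - e) else acc) c
      = c + (l.map (fun e => if e < lev then lev - e else 0)).sum := by
  induction l generalizing c with
  | nil => simp
  | cons e r ih =>
    simp only [List.foldl_cons, List.map_cons, List.sum_cons]
    by_cases he : e < lev
    · rw [if_pos he, if_pos he, ih]
      ring
    · rw [if_neg he, if_neg he, ih]
      ring

-- the cost sum vanishes when every element is ≥ lev
theorem pv_cost_zero (lev : Int) (l : List Int) (h : ∀ e ∈ l, ¬ e < lev) :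
    (l.map (fun e => if e < lev then lev - e else 0)).sum = 0 := by
  induction l with
  | nil => simp
  | cons e r ih =>
    simp only [List.map_cons, List.sum_cons]
    rw [if_neg (h e (by simp)), ih (fun e he => h e (by simp [he]))]
    ring

-- on a sorted list the cost sum is count·lev − (sum of the counted prefix)
theorem pv_sorted_cost (lev : Int) (s : List Int) (hs : s.Pairwise (· ≤ ·)) :
    (s.map (fun e => if e < lev then lev - e else 0)).sum
      = (s.countP (fun e => decide (e < lev)) : Int) * lev
        - (s.take (s.countP (fun e => decide (e < lev)))).sum := by
  induction s with
  | nil => simp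
  | cons e r ih =>
    rw [List.pairwise_cons] at hs
    by_cases he : e < lev
    · have hp : (fun e => decide (e < lev)) e = true := by simpa using he
      rw [List.map_cons, List.sum_cons, if_pos he, List.countP_cons_of_pos (p := fun e => decide (e < lev)) hp,
        List.take_succ_cons, List.sum_cons, ih hs.2]
      push_cast
      ring
    · have hall : ∀ a ∈ e :: r, ¬ a < lev := by
        intro a ha
        rcases List.mem_cons.mp ha with rfl | ha
        · exact he
        · have := hs.1 a ha; omega
      rw [pv_cost_zero lev _ hall]
      have hc : (e :: r).countP (fun e => decide (e < lev)) = 0 := by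
        rw [List.countP_eq_zero]
        intro a ha
        simp [hall a ha]
      rw [hc]
      simp

-- the prefix-sum list: entry j is the sum of the first j elements
theorem pv_prefAux_getD (s : List Int) :
    ∀ t j, j < s.length → (pvPrefAux t s).getD j 0 = t + (s.take (j + 1)).sum := by
  induction s with
  | nil => intro t j h; simp at h
  | cons v r ih =>
    intro t j h
    cases j with
    | zero => simp [pvPrefAux]
    | succ j =>
      simp only [pvPrefAux, List.getD_cons_succ, List.take_succ_cons, List.sum_cons]
      rw [ih (t + v) j (by simpa using h)]
      ring

theorem pv_prefix_getD (s : List Int) (j : Nat) (h : j ≤ s.length) :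
    (pvPrefix s).getD j 0 = (s.take j).sum := by
  cases j with
  | zero => simp [pvPrefix]
  | succ j =>
    simp only [pvPrefix, List.getD_cons_succ]
    rw [pv_prefAux_getD s 0 j (by omega)]
    simp

-- the count binary search ends at countP, given the sandwich invariants
theorem pv_countLt_inv (s : List Int) (x : Int) (hs : s.Pairwise (· ≤ ·)) :
    ∀ n a b, b - a = n → a ≤ b → b ≤ s.length →
    (∀ j, j < a → s.getD j 0 < x) → (∀ j, b ≤ j → j < s.length → ¬ s.getD j 0 < x) →
    pvCountLt s x a b = s.countP (fun e => decide (e < x)) := by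
  intro n
  induction n using Nat.strong_induction_on with
  | _ n ih =>
    intro a b hn hab hbl hlo hhi
    rw [pvCountLt]
    have hmono : ∀ i j (hi : i < s.length) (hj : j < s.length), i ≤ j → s[i] ≤ s[j] := by
      intro i j hi hj hij
      rcases Nat.lt_or_ge i j with h | h
      · exact (List.pairwise_iff_getElem.mp hs) i j hi hj h
      · have : i = j := by omega
        subst this; rfl
    by_cases h : a < b
    · rw [dif_pos h]
      have hm1 : (a + b) / 2 < b := by omega
      have hm0 : a ≤ (a + b) / 2 := by omega
      have hml : (a + b) / 2 < s.length := by omega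
      by_cases hsm : s.getD ((a + b) / 2) 0 < x
      · rw [if_pos hsm]
        refine ih (b - ((a + b) / 2 + 1)) (by omega) _ _ rfl (by omega) hbl ?_ hhi
        intro j hj
        rcases Nat.lt_or_ge j a with hja | hja
        · exact hlo j hja
        · have hjl : j < s.length := by omega
          have hle : s.getD j 0 ≤ s.getD ((a + b) / 2) 0 := by
            rw [List.getD_eq_getElem s 0 hjl, List.getD_eq_getElem s 0 hml]
            exact hmono j _ hjl hml (by omega)
          omega
      · rw [if_neg hsm]
        refine ih ((a + b) / 2 - a) (by omega) _ _ rfl (by omega) (by omega) hlo ?_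
        intro j hj hjl
        have hle : s.getD ((a + b) / 2) 0 ≤ s.getD j 0 := by
          rw [List.getD_eq_getElem s 0 hjl, List.getD_eq_getElem s 0 hml]
          exact hmono _ j hml hjl hj
        omega
    · rw [dif_neg h]
      have hab' : a = b := by omega
      subst hab'
      -- countP = (count over the first a) + (count over the rest) = a + 0
      conv_rhs => rw [← List.take_append_drop a s]
      rw [List.countP_append]
      have h1 : (s.take a).countP (fun e => decide (e < x)) = (s.take a).length := by
        rw [List.countP_eq_length]
        intro e he
        obtain ⟨i, hi, rfl⟩ := List.getElem_of_mem he
        rw [List.length_take] at hi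
        have hil : i < s.length := by omega
        have : (s.take a)[i] = s[i] := List.getElem_take
        rw [this]
        have hia : i < a := by omega
        have := hlo i hia
        rw [List.getD_eq_getElem s 0 hil] at this
        simpa using this
      have h2 : (s.drop a).countP (fun e => decide (e < x)) = 0 := by
        rw [List.countP_eq_zero]
        intro e he
        obtain ⟨i, hi, rfl⟩ := List.getElem_of_mem he
        rw [List.length_drop] at hi
        have hil : a + i < s.length := by omega
        have : (s.drop a)[i] = s[a + i] := List.getElem_drop
        rw [this]
        have := hhi (a + i) (by omega) hil
        rw [List.getD_eq_getElem s 0 hil] at this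
        simpa using this
      rw [h1, h2, List.length_take]
      omega

theorem pv_countLt_eq (s : List Int) (x : Int) (hs : s.Pairwise (· ≤ ·)) :
    pvCountLt s x 0 s.length = s.countP (fun e => decide (e < x)) :=
  pv_countLt_inv s x hs (s.length) 0 s.length rfl (by omega) le_rfl
    (by intro j hj; omega) (by intro j hj hjl; omega)

-- the two searches walk the same intervals and return the same endpoint
theorem pv_main (cl : List Int) (k : Int) :
    ∀ n lo hi, (hi + 1 - lo).toNat = n →
    level_management lo hi cl k
      = pvAltLoop (PySem.List.sorted cl (fun x => x) false)
          (pvPrefix (PySem.List.sorted cl (fun x => x) false)) k lo hi := by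
  intro n
  induction n using Nat.strong_induction_on with
  | _ n ih =>
    intro lo hi hn
    set s := PySem.List.sorted cl (fun x => x) false with hsdef
    have hs : s.Pairwise (· ≤ ·) := by
      simpa using PySem.List.sorted_pairwise cl (fun x => x)
    have hperm : s.Perm cl := PySem.List.sorted_perm cl (fun x => x) false
    rw [level_management, pvAltLoop]
    by_cases h : lo ≤ hi
    · rw [dif_neg (by omega : ¬ lo > hi), dif_pos h]
      set mid := PySem.Int.floordiv (lo + hi) 2 with hmid
      have hmb := PySem.Int.floordiv_two_mid_bounds h
      have hcnt : pvCountLt s mid 0 s.length = s.countP (fun e => decide (e < mid)) :=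
        pv_countLt_eq s mid hs
      have hcost :
          cl.foldl (fun acc e => if e < mid then acc + (mid - e) else acc) 0
            = (pvCountLt s mid 0 s.length : Int) * mid
              - (pvPrefix s).getD (pvCountLt s mid 0 s.length) 0 := by
        rw [pv_foldl_cost, hcnt, pv_prefix_getD s _ List.countP_le_length]
        have hmapeq : (cl.map (fun e => if e < mid then mid - e else 0)).sum
            = (s.map (fun e => if e < mid then mid - e else 0)).sum :=
          (List.Perm.sum_eq (List.Perm.map _ hperm)).symm
        rw [zero_add, hmapeq, pv_sorted_cost mid s hs]
      show (if cl.foldl (fun acc e => if e < mid then acc + (mid - e) else acc) 0 ≤ k then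
              level_management (mid + 1) hi cl k
            else level_management lo (mid - 1) cl k)
          = (if (pvCountLt s mid 0 s.length : Int) * mid
                - (pvPrefix s).getD (pvCountLt s mid 0 s.length) 0 ≤ k then
              pvAltLoop s (pvPrefix s) k (mid + 1) hi
            else pvAltLoop s (pvPrefix s) k lo (mid - 1))
      rw [hcost]
      by_cases hk : (pvCountLt s mid 0 s.length : Int) * mid
          - (pvPrefix s).getD (pvCountLt s mid 0 s.length) 0 ≤ k
      · rw [if_pos hk, if_pos hk]
        exact ih (hi + 1 - (mid + 1)).toNat (by omega) (mid + 1) hi (by omega)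
      · rw [if_neg hk, if_neg hk]
        exact ih ((mid - 1) + 1 - lo).toNat (by omega) lo (mid - 1) (by omega)
    · rw [dif_pos (by omega : lo > hi), dif_neg h]

-- ===== VERDICT (by name: the statement is the Claim_ definition above) =====
theorem level_management_spec : Claim_equal_level_management := by
  intro start end_ charLevel k _hdom
  unfold Spec_level_management level_management_alt
  exact pv_main charLevel k (end_ + 1 - start).toNat start end_ rfl
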